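-- pv_equiv track=rewrite | github.com/fakeyudi/Python-Practice-Tasks | Tasks 4Oct/Q3.py | checkAndReturn
-- ===== SOURCE A (Python) =====
-- def checkAndReturn(str):
--     str = list(str)
--     i = 0
--     ctr = 1
--     while i < len(str)-1:
--         if str[i] == str[i+1]:
--             ctr+=1
--             if ctr > 2:
--                 return("Invalid input")
--             str.pop(i)
--             i -= 1
--         else:
--             ctr = 1
--         i += 1
--     return("".join(str))
-- ===== SOURCE B (Python) =====
-- def checkAndReturn(str):
--     out = []
--     prev = None
--     run = 0
--     for ch in str:
--         if ch == prev:
--             run += 1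
--             if run == 3:
--                 return "Invalid input"
--         else:
--             prev = ch
--             run = 1
--             out.append(ch)
--     return "".join(out)
-- ===== Notes on version B (the rewrite author's own statement) =====
-- stated objective: faster
-- what changed: Replace the in-place while loop that pops duplicate characters from the list (O(n^2) due to repeated pop(i)) by a single left-to-right pass tracking the current run character and run length, appending one character per run and aborting at run length 3.
import Mathlib
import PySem

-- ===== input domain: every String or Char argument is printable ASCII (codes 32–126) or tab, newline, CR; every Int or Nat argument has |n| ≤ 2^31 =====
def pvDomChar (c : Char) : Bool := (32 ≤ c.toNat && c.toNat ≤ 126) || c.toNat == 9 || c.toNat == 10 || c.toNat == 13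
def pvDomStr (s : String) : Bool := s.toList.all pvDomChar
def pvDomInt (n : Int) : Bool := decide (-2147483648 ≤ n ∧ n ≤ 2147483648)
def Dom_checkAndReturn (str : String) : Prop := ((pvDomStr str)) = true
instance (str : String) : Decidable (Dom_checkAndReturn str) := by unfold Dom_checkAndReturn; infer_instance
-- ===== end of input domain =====

-- B replaces A's quadratic pop-in-place while loop by one linear pass over runs (objective: faster).

-- ===== PORT A =====
-- A's while loop: i stays ≥ 0 (the 'i -= 1' is immediately followed by 'i += 1'),
-- so i is kept as a Nat; str.pop(i) is eraseIdx i; indexing is in range because i+1 < length.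
def checkAndReturnLoop (s : List Char) (i : Nat) (ctr : Nat) : String :=
  if h : i + 1 < s.length then
    if s[i]'(by omega) = s[i+1]'h then
      if ctr + 1 > 2 then "Invalid input"
      else checkAndReturnLoop (s.eraseIdx i) i (ctr + 1)
    else checkAndReturnLoop s (i + 1) 1
  else String.ofList s
termination_by s.length - i
decreasing_by
  · have hi : i < s.length := by omega
    simp [List.length_eraseIdx, hi]; omega
  · omega

def checkAndReturn (str : String) : String := checkAndReturnLoop str.toList 0 1

-- ===== PORT B =====
-- one pass: out = one char per run so far, prev = current run char, run = its length
def checkAndReturnAltLoop : List Char → List Char → Option Char → Nat → String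
  | [], out, _, _ => String.ofList out
  | ch :: rest, out, prev, run =>
    if some ch = prev then
      if run + 1 = 3 then "Invalid input"
      else checkAndReturnAltLoop rest out prev (run + 1)
    else checkAndReturnAltLoop rest (out ++ [ch]) (some ch) 1

def checkAndReturn_alt (str : String) : String := checkAndReturnAltLoop str.toList [] none 0

-- ===== PRECONDITION & SPEC =====
def Spec_checkAndReturn (str : String) (out : String) : Prop := out = checkAndReturn_alt str
instance (str : String) (out : String) : Decidable (Spec_checkAndReturn str out) := by unfold Spec_checkAndReturn; infer_instance

-- ===== CLAIM (what is proved, stated in full; the proofs are below) =====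
def Claim_equal_checkAndReturn : Prop := ∀ (str : String), Dom_checkAndReturn str → Spec_checkAndReturn str (checkAndReturn str)

-- ===== LEMMAS AND PROOFS =====

theorem eraseIdx_mid (pre rest : List Char) (c d : Char) :
    (pre ++ c :: d :: rest).eraseIdx pre.length = pre ++ d :: rest := by
  induction pre with
  | nil => simp
  | cons x xs ih => simpa using ih

-- Invariant: when A's loop is at index i = pre.length with list pre ++ c :: rest and counter ctr,
-- B's loop state is (rest, pre ++ [c], some c, ctr).
theorem loop_key (rest : List Char) : ∀ (pre : List Char) (c : Char) (ctr : Nat),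
    ctr = 1 ∨ ctr = 2 →
    checkAndReturnLoop (pre ++ c :: rest) pre.length ctr
      = checkAndReturnAltLoop rest (pre ++ [c]) (some c) ctr := by
  induction rest with
  | nil =>
    intro pre c ctr _
    rw [checkAndReturnLoop]
    simp [checkAndReturnAltLoop]
  | cons d rest ih =>
    intro pre c ctr hctr
    rw [checkAndReturnLoop]
    have hlen : pre.length + 1 < (pre ++ c :: d :: rest).length := by
      simp
    rw [dif_pos hlen]
    have hc : (pre ++ c :: d :: rest)[pre.length]'(by omega) = c := by
      simp
    have hd : (pre ++ c :: d :: rest)[pre.length + 1]'hlen = d := by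
      rw [List.getElem_append_right (by omega)]
      simp
    rw [hc, hd]
    by_cases hcd : c = d
    · rw [if_pos hcd]
      rcases hctr with h1 | h2
      · subst h1
        have herase : (pre ++ c :: d :: rest).eraseIdx pre.length = pre ++ c :: rest := by
          rw [eraseIdx_mid]
          simp [hcd]
        simp only [show ¬ (1 + 1 > 2) by omega, herase]
        rw [ih pre c 2 (Or.inr rfl)]
        simp [checkAndReturnAltLoop, hcd]
      · subst h2
        simp [checkAndReturnAltLoop, hcd]
    · rw [if_neg hcd]
      have : pre.length + 1 = (pre ++ [c]).length := by simp
      rw [show pre ++ c :: d :: rest = (pre ++ [c]) ++ d :: rest by simp, this,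
        ih (pre ++ [c]) d 1 (Or.inl rfl)]
      have hne : ¬ (some d = some c) := by simpa using fun h => hcd h.symm
      simp [checkAndReturnAltLoop, hne]

-- ===== VERDICT (by name: the statement is the Claim_ definition above) =====
theorem checkAndReturn_spec : Claim_equal_checkAndReturn := by
  intro str _
  unfold Spec_checkAndReturn checkAndReturn checkAndReturn_alt
  cases h : str.toList with
  | nil =>
    rw [checkAndReturnLoop]
    simp [checkAndReturnAltLoop]
  | cons c rest =>
    have := loop_key rest [] c 1 (Or.inl rfl)
    simp only [List.nil_append, List.length_nil] at this
    rw [this]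
    simp [checkAndReturnAltLoop]
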